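-- pv_equiv track=rewrite | github.com/Dhanyaa-Srivastava/codes_vityarthi_Dhanya | is_carmichael(n).py | is_carmichael
-- ===== SOURCE A (Python) =====
-- import math
--
-- def is_prime(num):
--     if num <= 1:
--         return False
--     if num <= 3:
--         return True
--     if num % 2 == 0 or num % 3 == 0:
--         return False
--     i = 5
--     while i * i <= num:
--         if num % i == 0 or num % (i + 2) == 0:
--             return False
--         i += 6
--     return True
--
-- def prime_factors(n):
--     factors = set()
--     while n % 2 == 0:
--         factors.add(2)
--         n //= 2
--
--     for i in range(3, int(math.sqrt(n)) + 1, 2):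
--         while n % i == 0:
--             factors.add(i)
--             n //= i
--
--     if n > 2:
--         factors.add(n)
--     return factors
--
-- def is_carmichael(n):
--     if n < 2 or is_prime(n):
--         return False
--
--     factors = prime_factors(n)
--     product = 1
--     for p in factors:
--         if n % (p * p) == 0:
--             return False
--
--     for p in factors:
--         if (n - 1) % (p - 1) != 0:
--             return False
--     return True
-- ===== SOURCE B (Python) =====
-- def is_prime(num):
--     if num <= 1:
--         return False
--     if num <= 3:
--         return True
--     if num % 2 == 0 or num % 3 == 0:
--         return False
--     i = 5
--     while i * i <= num:
--         if num % i == 0 or num % (i + 2) == 0: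
--             return False
--         i += 6
--     return True
--
-- def is_carmichael(n):
--     # Korselt's criterion checked in one trial-division pass: no factor set,
--     # each prime factor's squarefree and (p-1) | (n-1) conditions are checked
--     # the moment the factor is extracted.
--     if n < 2 or is_prime(n):
--         return False
--     m = n
--     d = 2
--     while d * d <= m:
--         if m % d == 0:
--             m //= d
--             if m % d == 0 or (n - 1) % (d - 1) != 0:
--                 return False
--         d += 1
--     if m > 1 and (n - 1) % (m - 1) != 0:
--         return False
--     return True
-- ===== Notes on version B (the rewrite author's own statement) =====
-- stated objective: simpler
-- what changed: Replaced A's three-phase check (build a set of prime factors via a separate factorization routine, then two passes over the set for the squarefree and (p-1)|(n-1) Korselt conditions) by a single trial-division loop that checks both conditions inline as each prime factor is extracted, with no set and no extra passes.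
import Mathlib
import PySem

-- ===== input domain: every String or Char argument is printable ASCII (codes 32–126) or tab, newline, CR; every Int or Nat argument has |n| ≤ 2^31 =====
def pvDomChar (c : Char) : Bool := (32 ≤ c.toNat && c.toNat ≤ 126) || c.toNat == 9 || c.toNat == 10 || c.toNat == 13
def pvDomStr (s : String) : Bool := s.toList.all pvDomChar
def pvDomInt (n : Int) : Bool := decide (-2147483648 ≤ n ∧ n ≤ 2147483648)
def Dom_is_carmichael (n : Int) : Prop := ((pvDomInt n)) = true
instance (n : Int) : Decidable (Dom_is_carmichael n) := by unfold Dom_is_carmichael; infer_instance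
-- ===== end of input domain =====

-- B replaces A's factor-set + two checking passes by one trial-division loop that
-- checks Korselt's conditions inline as each prime factor is extracted (simpler; same cost).

-- ===== PORT A =====

-- helper is_prime (identical in Source A and Source B); while-loop ported with fuel,
-- `num.natAbs` iterations always suffice since i grows by 6 from 5.
def pyIsPrimeLoop (num i : Int) : Nat → Bool
  | 0 => true
  | f+1 =>
    if i * i ≤ num then
      if PySem.Int.mod num i == 0 || PySem.Int.mod num (i + 2) == 0 then false
      else pyIsPrimeLoop num (i + 6) f
    else true

def pyIsPrime (num : Int) : Bool :=
  if num ≤ 1 then false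
  else if num ≤ 3 then true
  else if PySem.Int.mod num 2 == 0 || PySem.Int.mod num 3 == 0 then false
  else pyIsPrimeLoop num 5 num.natAbs

-- `while n % 2 == 0: factors.add(2); n //= 2` (fuel: repeated halving ends within |m| steps)
def pfTwo (F : PySem.Set Int) (m : Int) : Nat → PySem.Set Int × Int
  | 0 => (F, m)
  | f+1 =>
    if PySem.Int.mod m 2 == 0 then
      pfTwo (PySem.Set.add F 2) (PySem.Int.floordiv m 2) f
    else (F, m)

-- inner `while n % i == 0: factors.add(i); n //= i`
def pfDivOut (F : PySem.Set Int) (m i : Int) : Nat → PySem.Set Int × Int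
  | 0 => (F, m)
  | f+1 =>
    if PySem.Int.mod m i == 0 then
      pfDivOut (PySem.Set.add F i) (PySem.Int.floordiv m i) i f
    else (F, m)

-- prime_factors(n); `int(math.sqrt(x))` is ported as `Nat.sqrt x.natAbs`, exact on this
-- task's domain (for 0 ≤ x ≤ 2^31 the float sqrt cannot cross an integer boundary).
def pyPrimeFactors (n : Int) : PySem.Set Int :=
  let st1 := pfTwo PySem.Set.empty n n.natAbs
  let st2 := (PySem.List.pyRange 3 (((Nat.sqrt st1.2.natAbs : Nat) : Int) + 1) 2).foldl
      (fun st i => pfDivOut st.1 st.2 i st.2.natAbs) st1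
  if 2 < st2.2 then PySem.Set.add st2.1 st2.2 else st2.1

-- the two `for p in factors` loops consume the set order-independently (early-return = any)
def is_carmichael (n : Int) : Bool :=
  if decide (n < 2) || pyIsPrime n then false
  else
    let factors := pyPrimeFactors n
    if factors.any (fun p => PySem.Int.mod n (p * p) == 0) then false
    else if factors.any (fun p => !(PySem.Int.mod (n - 1) (p - 1) == 0)) then false
    else true

-- ===== PORT B =====

-- the check after Source B's while-loop ends
def bExit (n m : Int) : Bool := !(decide (1 < m) && !(PySem.Int.mod (n - 1) (m - 1) == 0))

-- Source B's single trial-division loop; fuel: |m| iterations suffice since d starts at 2.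
def bLoop (n m d : Int) : Nat → Bool
  | 0 => if d * d ≤ m then true else bExit n m
  | f+1 =>
    if d * d ≤ m then
      if PySem.Int.mod m d == 0 then
        if PySem.Int.mod (PySem.Int.floordiv m d) d == 0
            || !(PySem.Int.mod (n - 1) (d - 1) == 0) then false
        else bLoop n (PySem.Int.floordiv m d) (d + 1) f
      else bLoop n m (d + 1) f
    else bExit n m

def is_carmichael_alt (n : Int) : Bool :=
  if decide (n < 2) || pyIsPrime n then false
  else bLoop n n 2 n.natAbs

-- ===== PRECONDITION & SPEC =====
def Spec_is_carmichael (n : Int) (out : Bool) : Prop := out = is_carmichael_alt n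
instance (n : Int) (out : Bool) : Decidable (Spec_is_carmichael n out) := by unfold Spec_is_carmichael; infer_instance

-- ===== CLAIM (what is proved, stated in full; the proofs are below) =====
def Claim_equal_is_carmichael : Prop := ∀ (n : Int), Dom_is_carmichael n → Spec_is_carmichael n (is_carmichael n)

-- ===== LEMMAS AND PROOFS =====

-- Both programs answer `Good n n`: every positive prime factor p of n occurs once
-- and satisfies (p-1) | (n-1).  (The shared `n < 2 or is_prime(n)` guard cancels.)
def Good (n m : Int) : Prop :=
  ∀ p : Int, Prime p → 0 < p → p ∣ m → (¬ (p * p ∣ m) ∧ (p - 1) ∣ (n - 1))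

-- basic prime facts over Int -------------------------------------------------

lemma prime_pos_two_le {p : Int} (hp : Prime p) (h0 : 0 < p) : 2 ≤ p := by
  have h := Int.prime_iff_natAbs_prime.mp hp
  have := h.two_le
  omega

lemma prime_pos_even_eq_two {p : Int} (hp : Prime p) (h0 : 0 < p) (h2 : (2:Int) ∣ p) : p = 2 := by
  have ha : Associated (2:Int) p := (Int.prime_two).associated_of_dvd hp h2
  rcases Int.associated_iff.mp ha with h | h <;> omega

lemma prime_pos_dvd_prime {p m : Int} (hp : Prime p) (h0 : 0 < p) (hm : Prime m)
    (hm0 : 0 < m) (h : p ∣ m) : p = m := by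
  have ha : Associated p m := hp.associated_of_dvd hm h
  rcases Int.associated_iff.mp ha with h | h <;> omega

lemma prime_natCast_int {q : Nat} (hq : q.Prime) : Prime ((q : Nat) : Int) := by
  rw [Int.prime_iff_natAbs_prime]
  simpa using hq

-- if every positive prime factor of m is ≥ d and d ∣ m (2 ≤ d, 1 ≤ m) then d is prime
lemma prime_of_min_dvd {m d : Int} (hd : 2 ≤ d) (hdvd : d ∣ m) (hm : 1 ≤ m)
    (hmin : ∀ p : Int, Prime p → 0 < p → p ∣ m → d ≤ p) : Prime d := by
  set q := d.natAbs.minFac with hq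
  have hd1 : d.natAbs ≠ 1 := by omega
  have hqp : q.Prime := Nat.minFac_prime hd1
  have hqd : (q : Int) ∣ d := by
    have h1 := Nat.minFac_dvd d.natAbs
    have h2 : (q:Int) ∣ (d.natAbs : Int) := Int.natCast_dvd_natCast.mpr h1
    rwa [Int.natAbs_of_nonneg (by omega)] at h2
  have hqm : (q : Int) ∣ m := hqd.trans hdvd
  have hqpi : Prime (q : Int) := prime_natCast_int hqp
  have h1 : d ≤ (q : Int) := hmin _ hqpi (by exact_mod_cast hqp.pos) hqm
  have h2 : (q : Int) ≤ d := Int.le_of_dvd (by omega) hqd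
  have h3 : (q : Int) = d := le_antisymm h2 h1
  rwa [← h3]

-- if every positive prime factor of m (≥ 2) exceeds a bound d with d*d > m then m is prime
lemma prime_of_no_small {m d : Int} (hm : 2 ≤ m) (hd2 : 2 ≤ d) (hg : ¬ d * d ≤ m)
    (hall : ∀ p : Int, Prime p → 0 < p → p ∣ m → d ≤ p) : Prime m := by
  by_contra hnp
  have hm1 : m.natAbs ≠ 1 := by omega
  set q := m.natAbs.minFac with hq
  have hqp : q.Prime := Nat.minFac_prime hm1
  have hqm : (q : Int) ∣ m := by
    have h1 := Nat.minFac_dvd m.natAbs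
    have h2 : (q:Int) ∣ (m.natAbs : Int) := Int.natCast_dvd_natCast.mpr h1
    rwa [Int.natAbs_of_nonneg (by omega)] at h2
  have hqpi : Prime (q : Int) := prime_natCast_int hqp
  have hdq : d ≤ (q : Int) := hall _ hqpi (by exact_mod_cast hqp.pos) hqm
  have hnp' : ¬ m.natAbs.Prime := by
    intro h
    exact hnp (by rwa [Int.prime_iff_natAbs_prime])
  have hsq : q * q ≤ m.natAbs := by
    have h1 := Nat.minFac_sq_le_self (by omega) hnp'
    nlinarith [h1]
  have hqq : ((q : Int)) * (q : Int) ≤ m := by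
    have h2 : ((q*q : Nat) : Int) ≤ ((m.natAbs : Nat) : Int) := by exact_mod_cast hsq
    push_cast at h2
    rwa [abs_of_nonneg (by omega : (0:Int) ≤ m)] at h2
  have hdd : d * d ≤ (q:Int) * (q:Int) := mul_le_mul hdq hdq (by omega) (by positivity)
  exact hg (by linarith)

-- a prime p ∤ i divides i^k * m' iff it divides m'
lemma prime_dvd_pow_mul {p i m' : Int} (k : Nat) (hp : Prime p) (hpi : ¬ p ∣ i) :
    p ∣ i ^ k * m' ↔ p ∣ m' := by
  constructor
  · intro h
    rcases hp.dvd_mul.mp h with h | h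
    · exact absurd (hp.dvd_of_dvd_pow h) hpi
    · exact h
  · intro h; exact h.mul_left _

-- peeling one prime factor d off m preserves `Good n`
lemma Good_step {n m m' d : Int} (hd : Prime d) (h0 : 0 < d) (he : m = d * m')
    (hnd : ¬ d ∣ m') (hk : (d - 1) ∣ (n - 1)) : (Good n m ↔ Good n m') := by
  have hm'm : m' ∣ m := ⟨d, by rw [he]; ring⟩
  constructor
  · intro hG p hp hpp hpm'
    obtain ⟨h1, h2⟩ := hG p hp hpp (hpm'.trans hm'm)
    exact ⟨fun hsq => h1 (hsq.trans hm'm), h2⟩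
  · intro hG p hp hpp hpm
    by_cases hpd : p = d
    · subst hpd
      refine ⟨?_, hk⟩
      intro hsq
      rw [he] at hsq
      exact hnd ((mul_dvd_mul_iff_left (show p ≠ 0 by omega)).mp hsq)
    · have hpd' : ¬ p ∣ d := fun h => hpd (prime_pos_dvd_prime hp hpp hd h0 h)
      have hpm' : p ∣ m' := by
        rw [he] at hpm
        rcases hp.dvd_mul.mp hpm with h | h
        · exact absurd h hpd'
        · exact h
      obtain ⟨h1, h2⟩ := hG p hp hpp hpm'
      refine ⟨?_, h2⟩
      intro hsq
      apply h1
      rcases hpm' with ⟨t, ht⟩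
      rw [he, ht] at hsq
      have hsq' : p ∣ d * t := by
        have h3 : d * (p * t) = p * (d * t) := by ring
        rw [h3] at hsq
        exact (mul_dvd_mul_iff_left (show p ≠ 0 by omega)).mp hsq
      rcases hp.dvd_mul.mp hsq' with h | h
      · exact absurd h hpd'
      · rw [ht]; exact mul_dvd_mul_left p h

-- B-side loop ----------------------------------------------------------------

lemma bExit_iff (n m d : Int) (hm : 1 ≤ m) (hd : 2 ≤ d)
    (hlow : ∀ p : Int, Prime p → 0 < p → p ∣ m → d ≤ p)
    (hg : ¬ d * d ≤ m) : (bExit n m = true ↔ Good n m) := by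
  by_cases hm1 : m = 1
  · subst hm1
    constructor
    · intro _ p hp hpp hdvd
      exact absurd (isUnit_of_dvd_one hdvd) hp.not_unit
    · intro _; simp [bExit]
  · have hm2 : 2 ≤ m := by omega
    have hmp : Prime m := prime_of_no_small hm2 hd hg hlow
    have hlhs : bExit n m = (PySem.Int.mod (n - 1) (m - 1) == 0) := by
      simp [bExit, show (1:Int) < m by omega]
    rw [hlhs]
    rw [show ((PySem.Int.mod (n - 1) (m - 1) == 0) = true ↔ (m - 1) ∣ (n - 1)) from
      by rw [beq_iff_eq]; exact PySem.Int.mod_eq_zero_iff_dvd _ _]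
    constructor
    · intro hdd p hp hpp hpm
      have hpe : p = m := prime_pos_dvd_prime hp hpp hmp (by omega) hpm
      subst hpe
      refine ⟨?_, hdd⟩
      intro hc
      have := Int.le_of_dvd (by omega) hc
      nlinarith
    · intro hG
      exact (hG m hmp (by omega) dvd_rfl).2

lemma bLoop_spec (n : Int) : ∀ (fuel : Nat) (m d : Int), 1 ≤ m → 2 ≤ d →
    (∀ p : Int, Prime p → 0 < p → p ∣ m → d ≤ p) →
    m.natAbs + 1 ≤ fuel + d.natAbs →
    (bLoop n m d fuel = true ↔ Good n m) := by
  intro fuel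
  induction fuel with
  | zero =>
    intro m d hm hd hlow hf
    by_cases hg : d * d ≤ m
    · exfalso
      have h2 : d < m := by nlinarith
      omega
    · have hred : bLoop n m d 0 = bExit n m := by
        simp only [bLoop, if_neg hg]
      rw [hred]
      exact bExit_iff n m d hm hd hlow hg
  | succ f ih =>
    intro m d hm hd hlow hf
    by_cases hg : d * d ≤ m
    · by_cases hdvd : d ∣ m
      · have hmod : PySem.Int.mod m d = 0 := (PySem.Int.mod_eq_zero_iff_dvd m d).mpr hdvd
        have hfd : PySem.Int.floordiv m d = m / d :=
          PySem.Int.floordiv_eq_ediv_of_pos (by omega)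
        have he : m = d * (m / d) := (Int.mul_ediv_cancel' hdvd).symm
        have hdp : Prime d := prime_of_min_dvd hd hdvd hm hlow
        have hm' : 1 ≤ m / d := by
          by_cases h : 1 ≤ m / d
          · exact h
          · exfalso
            have h0 : m / d ≤ 0 := by omega
            have h1 : d * (m / d) ≤ d * 0 := mul_le_mul_of_nonneg_left h0 (by omega)
            simp at h1
            omega
        have hmdvd : m / d ∣ m := ⟨d, by rw [mul_comm]; exact he⟩
        have hmuln : m.natAbs = d.natAbs * (m / d).natAbs := by
          conv_lhs => rw [he]
          exact Int.natAbs_mul d (m / d)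
        have hb2 : 2 * (m / d).natAbs ≤ m.natAbs := by
          rw [hmuln]
          exact Nat.mul_le_mul_right _ (by omega)
        by_cases hsq : d ∣ m / d
        · have hmod2 : PySem.Int.mod (m / d) d = 0 := (PySem.Int.mod_eq_zero_iff_dvd _ d).mpr hsq
          have hred : bLoop n m d (f+1) = false := by
            simp [bLoop, hg, hmod, hfd, hmod2]
          rw [hred]
          simp only [Bool.false_eq_true, false_iff]
          intro hG
          apply (hG d hdp (by omega) hdvd).1
          have h4 : d * d ∣ d * (m / d) := mul_dvd_mul_left d hsq
          rwa [← he] at h4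
        · by_cases hk : (d - 1) ∣ (n - 1)
          · have hmod3 : PySem.Int.mod (n-1) (d-1) = 0 := (PySem.Int.mod_eq_zero_iff_dvd _ _).mpr hk
            have hmod2' : ¬ PySem.Int.mod (m / d) d = 0 :=
              fun h => hsq ((PySem.Int.mod_eq_zero_iff_dvd _ d).mp h)
            have hred : bLoop n m d (f+1) = bLoop n (m / d) (d + 1) f := by
              simp [bLoop, hg, hmod, hfd, hmod2', hmod3]
            rw [hred]
            have hlow' : ∀ p : Int, Prime p → 0 < p → p ∣ m / d → d + 1 ≤ p := by
              intro p hp hpp hpm'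
              have hpm : p ∣ m := hpm'.trans hmdvd
              have h1 := hlow p hp hpp hpm
              have hne : p ≠ d := fun hEq => hsq (hEq ▸ hpm')
              omega
            rw [ih (m / d) (d + 1) hm' (by omega) hlow' (by omega)]
            exact (Good_step hdp (by omega) he hsq hk).symm
          · have hmod3' : ¬ PySem.Int.mod (n-1) (d-1) = 0 :=
              fun h => hk ((PySem.Int.mod_eq_zero_iff_dvd _ _).mp h)
            have hred : bLoop n m d (f+1) = false := by
              simp [bLoop, hg, hmod, hfd, hmod3']
            rw [hred]
            simp only [Bool.false_eq_true, false_iff]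
            intro hG
            exact hk (hG d hdp (by omega) hdvd).2
      · have hmod' : ¬ PySem.Int.mod m d = 0 :=
          fun h => hdvd ((PySem.Int.mod_eq_zero_iff_dvd m d).mp h)
        have hred : bLoop n m d (f+1) = bLoop n m (d+1) f := by
          simp [bLoop, hg, hmod']
        rw [hred]
        have hlow' : ∀ p : Int, Prime p → 0 < p → p ∣ m → d + 1 ≤ p := by
          intro p hp hpp hpm
          have h1 := hlow p hp hpp hpm
          have hne : p ≠ d := fun hEq => hdvd (hEq ▸ hpm)
          omega
        exact ih m (d+1) hm (by omega) hlow' (by omega)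
    · have hred : bLoop n m d (f+1) = bExit n m := by
        simp only [bLoop, if_neg hg]
      rw [hred]
      exact bExit_iff n m d hm hd hlow hg

-- A-side loops ---------------------------------------------------------------

lemma pfTwo_spec : ∀ (fuel : Nat) (F : PySem.Set Int) (m : Int), 1 ≤ m →
    m.natAbs ≤ fuel + 1 →
    1 ≤ (pfTwo F m fuel).2 ∧ ¬ (2:Int) ∣ (pfTwo F m fuel).2 ∧
    (∃ k : Nat, m = 2 ^ k * (pfTwo F m fuel).2) ∧
    (∀ x : Int, x ∈ (pfTwo F m fuel).1 ↔ x ∈ F ∨ (x = 2 ∧ (2:Int) ∣ m)) := by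
  intro fuel
  induction fuel with
  | zero =>
    intro F m hm hb
    have hm1 : m = 1 := by omega
    subst hm1
    have hred : pfTwo F 1 0 = (F, 1) := rfl
    simp only [hred]
    exact ⟨le_refl 1, by norm_num, ⟨0, by ring⟩, fun x => by norm_num⟩
  | succ f ih =>
    intro F m hm hb
    by_cases h2 : (2:Int) ∣ m
    · have hmod : PySem.Int.mod m 2 = 0 := (PySem.Int.mod_eq_zero_iff_dvd m 2).mpr h2
      have hfd : PySem.Int.floordiv m 2 = m / 2 :=
        PySem.Int.floordiv_eq_ediv_of_pos (by norm_num)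
      have he : m = 2 * (m / 2) := (Int.mul_ediv_cancel' h2).symm
      have hm' : 1 ≤ m / 2 := by omega
      have hb' : (m / 2).natAbs ≤ f + 1 := by omega
      have hred : pfTwo F m (f+1) = pfTwo (PySem.Set.add F 2) (m / 2) f := by
        simp [pfTwo, hmod, hfd, show m % 2 = 0 by omega]
      obtain ⟨c1, c2, ⟨k, hk⟩, c4⟩ := ih (PySem.Set.add F 2) (m / 2) hm' hb'
      set P := pfTwo (PySem.Set.add F 2) (m / 2) f with hP
      rw [hred]
      refine ⟨c1, c2, ⟨k+1, ?_⟩, ?_⟩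
      · conv_lhs => rw [he, hk]
        ring
      · intro x
        rw [c4 x, PySem.Set.mem_add]
        constructor
        · rintro ((h | h) | ⟨h, _⟩)
          · exact Or.inl h
          · exact Or.inr ⟨h, h2⟩
          · exact Or.inr ⟨h, h2⟩
        · rintro (h | ⟨h, _⟩)
          · exact Or.inl (Or.inl h)
          · exact Or.inl (Or.inr h)
    · have hmod : ¬ PySem.Int.mod m 2 = 0 := fun h => h2 ((PySem.Int.mod_eq_zero_iff_dvd m 2).mp h)
      have hred : pfTwo F m (f+1) = (F, m) := by
        simp [pfTwo, hmod, show m % 2 = 1 by omega]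
      simp only [hred]
      exact ⟨hm, h2, ⟨0, by ring⟩, fun x => by simp [h2]⟩

lemma pfDivOut_spec : ∀ (fuel : Nat) (F : PySem.Set Int) (m i : Int), 1 ≤ m → 2 ≤ i →
    m.natAbs ≤ fuel + 1 →
    1 ≤ (pfDivOut F m i fuel).2 ∧ ¬ i ∣ (pfDivOut F m i fuel).2 ∧
    (∃ k : Nat, m = i ^ k * (pfDivOut F m i fuel).2) ∧
    (∀ x : Int, x ∈ (pfDivOut F m i fuel).1 ↔ x ∈ F ∨ (x = i ∧ i ∣ m)) := by
  intro fuel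
  induction fuel with
  | zero =>
    intro F m i hm hi hb
    have hm1 : m = 1 := by omega
    subst hm1
    have hni : ¬ i ∣ 1 := fun h => by have := Int.le_of_dvd one_pos h; omega
    have hred : pfDivOut F 1 i 0 = (F, 1) := rfl
    simp only [hred]
    exact ⟨le_refl 1, hni, ⟨0, by ring⟩, fun x => by simp [hni]⟩
  | succ f ih =>
    intro F m i hm hi hb
    by_cases h2 : i ∣ m
    · have hmod : PySem.Int.mod m i = 0 := (PySem.Int.mod_eq_zero_iff_dvd m i).mpr h2
      have hfd : PySem.Int.floordiv m i = m / i :=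
        PySem.Int.floordiv_eq_ediv_of_pos (by omega)
      have he : m = i * (m / i) := (Int.mul_ediv_cancel' h2).symm
      have hm' : 1 ≤ m / i := by
        by_cases h : 1 ≤ m / i
        · exact h
        · exfalso
          have h0 : m / i ≤ 0 := by omega
          have h1 : i * (m / i) ≤ i * 0 := mul_le_mul_of_nonneg_left h0 (by omega)
          simp at h1
          omega
      have hmuln : m.natAbs = i.natAbs * (m / i).natAbs := by
        conv_lhs => rw [he]
        exact Int.natAbs_mul i (m / i)
      have hb' : (m / i).natAbs ≤ f + 1 := by
        have h2' : 2 * (m / i).natAbs ≤ i.natAbs * (m / i).natAbs :=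
          Nat.mul_le_mul_right _ (by omega)
        omega
      have hred : pfDivOut F m i (f+1) = pfDivOut (PySem.Set.add F i) (m / i) i f := by
        simp [pfDivOut, hmod, hfd]
      obtain ⟨c1, c2, ⟨k, hk⟩, c4⟩ := ih (PySem.Set.add F i) (m / i) i hm' hi hb'
      set P := pfDivOut (PySem.Set.add F i) (m / i) i f with hP
      rw [hred]
      refine ⟨c1, c2, ⟨k+1, ?_⟩, ?_⟩
      · conv_lhs => rw [he, hk]
        ring
      · intro x
        rw [c4 x, PySem.Set.mem_add]
        constructor
        · rintro ((h | h) | ⟨h, _⟩)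
          · exact Or.inl h
          · exact Or.inr ⟨h, h2⟩
          · exact Or.inr ⟨h, h2⟩
        · rintro (h | ⟨h, _⟩)
          · exact Or.inl (Or.inl h)
          · exact Or.inl (Or.inr h)
    · have hmod : ¬ PySem.Int.mod m i = 0 := fun h => h2 ((PySem.Int.mod_eq_zero_iff_dvd m i).mp h)
      have hred : pfDivOut F m i (f+1) = (F, m) := by
        simp [pfDivOut, hmod]
      simp only [hred]
      exact ⟨hm, h2, ⟨0, by ring⟩, fun x => by simp [h2]⟩

lemma pyRange_two_eq_nil {a b : Int} (h : b ≤ a) : PySem.List.pyRange a b 2 = [] := by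
  rw [PySem.List.pyRange_of_pos a b (by norm_num)]
  rw [if_neg (by omega)]
  simp

lemma pyRange_two_cons {a b : Int} (h : a < b) :
    PySem.List.pyRange a b 2 = a :: PySem.List.pyRange (a + 2) b 2 := by
  rw [PySem.List.pyRange_of_pos a b (by norm_num),
      PySem.List.pyRange_of_pos (a+2) b (by norm_num)]
  rw [if_pos h]
  by_cases h2 : a + 2 < b
  · rw [if_pos h2]
    have hc : ((b - a + 2 - 1)/2).toNat = ((b - (a+2) + 2 - 1)/2).toNat + 1 := by omega
    rw [hc, List.range_succ_eq_map]
    simp only [List.map_cons, List.map_map, Nat.cast_zero, mul_zero, add_zero]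
    congr 1
    apply List.map_congr_left
    intro k _
    simp only [Function.comp_apply]
    push_cast
    ring
  · rw [if_neg h2]
    have hc : ((b - a + 2 - 1)/2).toNat = 1 := by omega
    rw [hc]
    simp

lemma prime_not_succ_of_odd {c p : Int} (h3 : 3 ≤ c) (hodd : ¬ (2:Int) ∣ c)
    (hp : Prime p) (h0 : 0 < p) : p ≠ c + 1 := by
  intro heq
  have h2 : (2:Int) ∣ p := by omega
  have := prime_pos_even_eq_two hp h0 h2
  omega

lemma fold_empty (N K : Int) (c : Int) (F : PySem.Set Int) (m : Int)
    (hK : K + 1 ≤ c) (hm1 : 1 ≤ m)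
    (Hlow : ∀ p : Int, Prime p → 0 < p → p ∣ m → c ≤ p)
    (Htrans : ∀ p : Int, Prime p → 0 < p → p ∣ N → c ≤ p → p ∣ m)
    (Hmem : ∀ x : Int, x ∈ F ↔ Prime x ∧ 0 < x ∧ x ∣ N ∧ x < c) :
    1 ≤ ((PySem.List.pyRange c (K+1) 2).foldl (fun st i => pfDivOut st.1 st.2 i st.2.natAbs) (F, m)).2 ∧
    ((PySem.List.pyRange c (K+1) 2).foldl (fun st i => pfDivOut st.1 st.2 i st.2.natAbs) (F, m)).2 ∣ m ∧
    (∀ p : Int, Prime p → 0 < p → p ∣ ((PySem.List.pyRange c (K+1) 2).foldl (fun st i => pfDivOut st.1 st.2 i st.2.natAbs) (F, m)).2 → K < p) ∧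
    (∀ p : Int, Prime p → 0 < p → p ∣ N → c ≤ p → K < p → p ∣ ((PySem.List.pyRange c (K+1) 2).foldl (fun st i => pfDivOut st.1 st.2 i st.2.natAbs) (F, m)).2) ∧
    (∀ x : Int, x ∈ ((PySem.List.pyRange c (K+1) 2).foldl (fun st i => pfDivOut st.1 st.2 i st.2.natAbs) (F, m)).1 ↔
      Prime x ∧ 0 < x ∧ x ∣ N ∧ (x < c ∨ x ≤ K)) := by
  rw [pyRange_two_eq_nil hK]
  simp only [List.foldl_nil]
  refine ⟨hm1, dvd_rfl, ?_, ?_, ?_⟩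
  · intro p hp hpp hpm
    have := Hlow p hp hpp hpm
    omega
  · intro p hp hpp hpN hcp _
    exact Htrans p hp hpp hpN hcp
  · intro x
    rw [Hmem x]
    constructor
    · rintro ⟨a1, a2, a3, a4⟩
      exact ⟨a1, a2, a3, Or.inl a4⟩
    · rintro ⟨a1, a2, a3, a4⟩
      refine ⟨a1, a2, a3, ?_⟩
      rcases a4 with h | h
      · exact h
      · omega

lemma fold_spec (N K : Int) :
    ∀ (t : Nat) (c : Int) (F : PySem.Set Int) (m : Int),
    (K + 1 - c).toNat ≤ t →
    3 ≤ c → ¬ (2:Int) ∣ c → 1 ≤ m → m ∣ N →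
    (∀ p : Int, Prime p → 0 < p → p ∣ m → c ≤ p) →
    (∀ p : Int, Prime p → 0 < p → p ∣ N → c ≤ p → p ∣ m) →
    (∀ x : Int, x ∈ F ↔ Prime x ∧ 0 < x ∧ x ∣ N ∧ x < c) →
    1 ≤ ((PySem.List.pyRange c (K+1) 2).foldl (fun st i => pfDivOut st.1 st.2 i st.2.natAbs) (F, m)).2 ∧
    ((PySem.List.pyRange c (K+1) 2).foldl (fun st i => pfDivOut st.1 st.2 i st.2.natAbs) (F, m)).2 ∣ m ∧
    (∀ p : Int, Prime p → 0 < p → p ∣ ((PySem.List.pyRange c (K+1) 2).foldl (fun st i => pfDivOut st.1 st.2 i st.2.natAbs) (F, m)).2 → K < p) ∧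
    (∀ p : Int, Prime p → 0 < p → p ∣ N → c ≤ p → K < p → p ∣ ((PySem.List.pyRange c (K+1) 2).foldl (fun st i => pfDivOut st.1 st.2 i st.2.natAbs) (F, m)).2) ∧
    (∀ x : Int, x ∈ ((PySem.List.pyRange c (K+1) 2).foldl (fun st i => pfDivOut st.1 st.2 i st.2.natAbs) (F, m)).1 ↔
      Prime x ∧ 0 < x ∧ x ∣ N ∧ (x < c ∨ x ≤ K)) := by
  intro t
  induction t with
  | zero =>
    intro c F m hct h3 hodd hm1 hmN Hlow Htrans Hmem
    exact fold_empty N K c F m (by omega) hm1 Hlow Htrans Hmem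
  | succ t ih =>
    intro c F m hct h3 hodd hm1 hmN Hlow Htrans Hmem
    by_cases hcK : K + 1 ≤ c
    · exact fold_empty N K c F m hcK hm1 Hlow Htrans Hmem
    · have hc : c < K + 1 := by omega
      have hstep : pfDivOut (F, m).1 (F, m).2 c (F, m).2.natAbs
          = pfDivOut F m c m.natAbs := rfl
      rw [pyRange_two_cons hc, List.foldl_cons, hstep]
      obtain ⟨h1', hnd, ⟨k, hk⟩, hmem'⟩ := pfDivOut_spec m.natAbs F m c hm1 (by omega) (by omega)
      set F' := (pfDivOut F m c m.natAbs).1 with hF'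
      set m' := (pfDivOut F m c m.natAbs).2 with hm'def
      have hm'm : m' ∣ m := ⟨c ^ k, by rw [hk]; ring⟩
      have Hlow' : ∀ p : Int, Prime p → 0 < p → p ∣ m' → c + 2 ≤ p := by
        intro p hp hpp hpm'
        have hpm : p ∣ m := hpm'.trans hm'm
        have hge := Hlow p hp hpp hpm
        have hne : p ≠ c := fun hEq => hnd (hEq ▸ hpm')
        have hne2 := prime_not_succ_of_odd h3 hodd hp hpp
        omega
      have Htrans' : ∀ p : Int, Prime p → 0 < p → p ∣ N → c + 2 ≤ p → p ∣ m' := by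
        intro p hp hpp hpN hcp2
        have hpm := Htrans p hp hpp hpN (by omega)
        have hpc : ¬ p ∣ c := fun hdc => by
          have := Int.le_of_dvd (by omega) hdc
          omega
        rw [hk] at hpm
        exact (prime_dvd_pow_mul k hp hpc).mp hpm
      have Hmem'' : ∀ x : Int, x ∈ F' ↔ Prime x ∧ 0 < x ∧ x ∣ N ∧ x < c + 2 := by
        intro x
        rw [hmem' x]
        constructor
        · rintro (h | ⟨rfl, hdvd⟩)
          · obtain ⟨a1, a2, a3, a4⟩ := (Hmem x).mp h
            exact ⟨a1, a2, a3, by omega⟩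
          · have hcp : Prime x := prime_of_min_dvd (by omega) hdvd hm1 Hlow
            exact ⟨hcp, by omega, hdvd.trans hmN, by omega⟩
        · rintro ⟨a1, a2, a3, a4⟩
          by_cases hlt : x < c
          · exact Or.inl ((Hmem x).mpr ⟨a1, a2, a3, hlt⟩)
          · have hne := prime_not_succ_of_odd h3 hodd a1 a2
            have hxc : x = c := by omega
            subst hxc
            exact Or.inr ⟨rfl, Htrans x a1 a2 a3 (by omega)⟩
      obtain ⟨C1, C2, C3, C4, C5⟩ := ih (c+2) F' m' (by omega) (by omega) (by omega)
        h1' (hm'm.trans hmN) Hlow' Htrans' Hmem''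
      refine ⟨C1, C2.trans hm'm, C3, ?_, ?_⟩
      · intro p hp hpp hpN hcp hKp
        have hne := prime_not_succ_of_odd h3 hodd hp hpp
        exact C4 p hp hpp hpN (by omega) hKp
      · intro x
        rw [C5 x]
        constructor
        · rintro ⟨a1, a2, a3, a4⟩
          have hne := prime_not_succ_of_odd h3 hodd a1 a2
          exact ⟨a1, a2, a3, by omega⟩
        · rintro ⟨a1, a2, a3, a4⟩
          exact ⟨a1, a2, a3, by omega⟩

lemma pyPrimeFactors_members (n : Int) (hn : 2 ≤ n) :
    ∀ x : Int, x ∈ pyPrimeFactors n ↔ Prime x ∧ 0 < x ∧ x ∣ n := by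
  intro x
  obtain ⟨hm1, hodd1, ⟨k0, hk0⟩, mem1⟩ :=
    pfTwo_spec n.natAbs PySem.Set.empty n (by omega) (by omega)
  simp only [pyPrimeFactors]
  set st1 := pfTwo PySem.Set.empty n n.natAbs with hst1
  set K : Int := ((Nat.sqrt st1.2.natAbs : Nat) : Int) with hKdef
  have hm1N : st1.2 ∣ n := ⟨2^k0, by rw [hk0]; ring⟩
  have Hlow3 : ∀ p : Int, Prime p → 0 < p → p ∣ st1.2 → 3 ≤ p := by
    intro p hp hpp hpm
    have h2le := prime_pos_two_le hp hpp
    have hne : p ≠ 2 := fun hEq => hodd1 (hEq ▸ hpm)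
    omega
  have Htrans3 : ∀ p : Int, Prime p → 0 < p → p ∣ n → 3 ≤ p → p ∣ st1.2 := by
    intro p hp hpp hpN h3p
    have hpc : ¬ p ∣ 2 := fun hdc => by
      have := Int.le_of_dvd (by norm_num) hdc
      omega
    rw [hk0] at hpN
    exact (prime_dvd_pow_mul k0 hp hpc).mp hpN
  have Hmem3 : ∀ y : Int, y ∈ st1.1 ↔ Prime y ∧ 0 < y ∧ y ∣ n ∧ y < 3 := by
    intro y
    rw [mem1 y]
    constructor
    · rintro (h | ⟨rfl, hdvd⟩)
      · exact absurd h (List.not_mem_nil)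
      · exact ⟨Int.prime_two, by norm_num, hdvd, by norm_num⟩
    · rintro ⟨a1, a2, a3, a4⟩
      have h2le := prime_pos_two_le a1 a2
      have hy2 : y = 2 := by omega
      subst hy2
      exact Or.inr ⟨rfl, a3⟩
  obtain ⟨C1, C2, C3, C4, C5⟩ := fold_spec n K (K + 1 - 3).toNat 3 st1.1 st1.2
    (le_refl _) (by norm_num) (by decide) hm1 hm1N Hlow3 Htrans3 Hmem3
  set r := (PySem.List.pyRange 3 (K+1) 2).foldl
      (fun st i => pfDivOut st.1 st.2 i st.2.natAbs) (st1.1, st1.2) with hrdef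
  have hrpair : (st1.1, st1.2) = st1 := rfl
  rw [hrpair] at hrdef
  have hrodd : ¬ (2:Int) ∣ r.2 := fun h => hodd1 (h.trans C2)
  by_cases hbig : 2 < r.2
  · have hrprime : Prime r.2 := by
      by_contra hnp
      have hr3 : 3 ≤ r.2 := by omega
      set q := r.2.natAbs.minFac with hqdef
      have hqp : q.Prime := Nat.minFac_prime (by omega)
      have hqm : (q : Int) ∣ r.2 := by
        have hq1 := Nat.minFac_dvd r.2.natAbs
        have hq2 : (q:Int) ∣ (r.2.natAbs : Int) := Int.natCast_dvd_natCast.mpr hq1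
        rwa [Int.natAbs_of_nonneg (by omega)] at hq2
      have hKq : K < (q : Int) := C3 (q:Int) (prime_natCast_int hqp) (by exact_mod_cast hqp.pos) hqm
      have hnp' : ¬ r.2.natAbs.Prime := fun h => hnp (by rwa [Int.prime_iff_natAbs_prime])
      have hsq : q * q ≤ r.2.natAbs := by
        have h1 := Nat.minFac_sq_le_self (by omega) hnp'
        nlinarith [h1]
      have hle : r.2.natAbs ≤ st1.2.natAbs :=
        Nat.le_of_dvd (by omega) (Int.natAbs_dvd_natAbs.mpr C2)
      have hKq' : Nat.sqrt st1.2.natAbs < q := by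
        rw [hKdef] at hKq
        exact_mod_cast hKq
      have hlt := Nat.sqrt_lt'.mp hKq'
      have : st1.2.natAbs < q * q := by nlinarith [hlt]
      omega
    rw [if_pos hbig, PySem.Set.mem_add]
    constructor
    · rintro (h | rfl)
      · obtain ⟨a1, a2, a3, _⟩ := (C5 x).mp h
        exact ⟨a1, a2, a3⟩
      · exact ⟨hrprime, by omega, C2.trans hm1N⟩
    · rintro ⟨a1, a2, a3⟩
      by_cases hx : x < 3 ∨ x ≤ K
      · exact Or.inl ((C5 x).mpr ⟨a1, a2, a3, hx⟩)
      · push_neg at hx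
        have hxr : x ∣ r.2 := C4 x a1 a2 a3 (by omega) (by omega)
        exact Or.inr (prime_pos_dvd_prime a1 a2 hrprime (by omega) hxr)
  · have hr1 : r.2 = 1 := by omega
    rw [if_neg hbig]
    constructor
    · intro h
      obtain ⟨a1, a2, a3, _⟩ := (C5 x).mp h
      exact ⟨a1, a2, a3⟩
    · rintro ⟨a1, a2, a3⟩
      by_cases hx : x < 3 ∨ x ≤ K
      · exact (C5 x).mpr ⟨a1, a2, a3, hx⟩
      · exfalso
        push_neg at hx
        have hxr : x ∣ r.2 := C4 x a1 a2 a3 (by omega) (by omega)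
        rw [hr1] at hxr
        have hle := Int.le_of_dvd one_pos hxr
        have h2le := prime_pos_two_le a1 a2
        omega

-- the two sides --------------------------------------------------------------

lemma A_iff (n : Int) (hn : 2 ≤ n) (hp : pyIsPrime n = false) :
    (is_carmichael n = true ↔ Good n n) := by
  have hgneg : ¬ ((decide (n < 2) || pyIsPrime n) = true) := by
    simp [hp]
    omega
  have hF := pyPrimeFactors_members n hn
  set F := pyPrimeFactors n with hFdef
  have hunf : is_carmichael n =
      (if F.any (fun p => PySem.Int.mod n (p * p) == 0) then false
       else if F.any (fun p => !(PySem.Int.mod (n - 1) (p - 1) == 0)) then false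
       else true) := by
    rw [is_carmichael, if_neg hgneg]
  rw [hunf]
  by_cases hA : F.any (fun p => PySem.Int.mod n (p * p) == 0) = true
  · rw [if_pos hA]
    simp only [Bool.false_eq_true, false_iff]
    intro hG
    obtain ⟨p, hpF, hpc⟩ := List.any_eq_true.mp hA
    obtain ⟨a1, a2, a3⟩ := (hF p).mp hpF
    have hdvd : p * p ∣ n := (PySem.Int.mod_eq_zero_iff_dvd n (p*p)).mp (by simpa using hpc)
    exact (hG p a1 a2 a3).1 hdvd
  · rw [if_neg hA]
    by_cases hB : F.any (fun p => !(PySem.Int.mod (n - 1) (p - 1) == 0)) = true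
    · rw [if_pos hB]
      simp only [Bool.false_eq_true, false_iff]
      intro hG
      obtain ⟨p, hpF, hpc⟩ := List.any_eq_true.mp hB
      obtain ⟨a1, a2, a3⟩ := (hF p).mp hpF
      have hmodne : ¬ PySem.Int.mod (n-1) (p-1) = 0 := by simpa using hpc
      exact hmodne ((PySem.Int.mod_eq_zero_iff_dvd _ _).mpr (hG p a1 a2 a3).2)
    · rw [if_neg hB]
      constructor
      · intro _ p hp' hpp hpn
        have hpF : p ∈ F := (hF p).mpr ⟨hp', hpp, hpn⟩
        constructor
        · intro hdvd
          apply hA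
          refine List.any_eq_true.mpr ⟨p, hpF, ?_⟩
          simp [(PySem.Int.mod_eq_zero_iff_dvd n (p*p)).mpr hdvd]
        · by_contra hnd
          apply hB
          refine List.any_eq_true.mpr ⟨p, hpF, ?_⟩
          rw [Bool.not_eq_true', beq_eq_false_iff_ne]
          exact fun hc => hnd ((PySem.Int.mod_eq_zero_iff_dvd _ _).mp hc)
      · intro _
        rfl

lemma B_iff (n : Int) (hn : 2 ≤ n) (hp : pyIsPrime n = false) :
    (is_carmichael_alt n = true ↔ Good n n) := by
  have hgneg : ¬ ((decide (n < 2) || pyIsPrime n) = true) := by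
    simp [hp]
    omega
  have hred : is_carmichael_alt n = bLoop n n 2 n.natAbs := by
    rw [is_carmichael_alt, if_neg hgneg]
  rw [hred]
  exact bLoop_spec n n.natAbs n 2 (by omega) (by norm_num)
    (fun p hp' hpp _ => prime_pos_two_le hp' hpp) (by omega)

-- ===== VERDICT (by name: the statement is the Claim_ definition above) =====
theorem is_carmichael_spec : Claim_equal_is_carmichael := by
  intro n _
  unfold Spec_is_carmichael
  by_cases h2 : n < 2
  · simp [is_carmichael, is_carmichael_alt, h2]
  · by_cases hp : pyIsPrime n = true
    · simp [is_carmichael, is_carmichael_alt, hp]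
    · have hn : 2 ≤ n := by omega
      have hp' : pyIsPrime n = false := by simpa using hp
      have hA := A_iff n hn hp'
      have hB := B_iff n hn hp'
      cases hA' : is_carmichael n <;> cases hB' : is_carmichael_alt n <;> simp_all
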